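-- pv_equiv track=rewrite | github.com/amitkhotele/GeeksforGeeks-POTD | July 2025 Solutions/July-18.py | lcmTriplets
-- ===== SOURCE A (Python) =====
-- import math
--
-- def lcmTriplets(n):
--     def lcm(a, b):
--         return a * b // math.gcd(a, b)
--
--     def lcm3(a, b, c):
--         return lcm(lcm(a, b), c)
--
--     if n <= 2:
--         return n
--
--     max_lcm = 0
--     # Try all combinations of triplets in the range [n, n-5] for maximum LCM
--     for i in range(n, max(n - 6, 0), -1):
--         for j in range(n, max(n - 6, 0), -1):
--             for k in range(n, max(n - 6, 0), -1):
--                 if i != j and j != k and i != k: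
--                     max_lcm = max(max_lcm, lcm3(i, j, k))
--
--     return max_lcm
-- ===== SOURCE B (Python) =====
-- def lcmTriplets(n):
--     if n <= 2:
--         return n
--     if n % 2 == 1:
--         return n * (n - 1) * (n - 2)
--     if n % 3 != 0:
--         return n * (n - 1) * (n - 3)
--     return (n - 1) * (n - 2) * (n - 3)
-- ===== Notes on version B (the rewrite author's own statement) =====
-- stated objective: simpler
-- what changed: Replaces the brute-force triple nested loop with gcd/lcm evaluations over the window of six values below n by the closed-form maximum LCM of three distinct integers not exceeding n, selected by n's parity and divisibility by three.
import Mathlib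
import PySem

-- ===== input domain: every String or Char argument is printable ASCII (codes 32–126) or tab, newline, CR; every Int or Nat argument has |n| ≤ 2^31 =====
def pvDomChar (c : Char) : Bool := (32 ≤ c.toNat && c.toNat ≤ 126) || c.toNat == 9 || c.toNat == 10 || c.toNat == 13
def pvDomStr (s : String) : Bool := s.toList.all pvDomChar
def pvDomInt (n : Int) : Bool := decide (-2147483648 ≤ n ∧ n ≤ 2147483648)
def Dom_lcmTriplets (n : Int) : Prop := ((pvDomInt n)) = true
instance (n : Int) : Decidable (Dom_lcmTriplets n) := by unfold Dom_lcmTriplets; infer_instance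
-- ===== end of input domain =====

-- B replaces A's brute-force triple loop by the closed-form maximum LCM of three
-- distinct integers ≤ n, chosen by n's parity and divisibility by 3 (objective: simpler).

-- ===== PORT A =====
def pyLcm (a b : Int) : Int := PySem.Int.floordiv (a * b) (Int.gcd a b)
def pyLcm3 (a b c : Int) : Int := pyLcm (pyLcm a b) c

def lcmTriplets (n : Int) : Int :=
  if n ≤ 2 then n
  else
    (PySem.List.pyRange n (max (n - 6) 0) (-1)).foldl (fun acc i =>
      (PySem.List.pyRange n (max (n - 6) 0) (-1)).foldl (fun acc2 j =>
        (PySem.List.pyRange n (max (n - 6) 0) (-1)).foldl (fun acc3 k =>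
          if i ≠ j ∧ j ≠ k ∧ i ≠ k then max acc3 (pyLcm3 i j k) else acc3) acc2) acc) 0

-- ===== PORT B =====
def lcmTriplets_alt (n : Int) : Int :=
  if n ≤ 2 then n
  else if PySem.Int.mod n 2 = 1 then n * (n - 1) * (n - 2)
  else if PySem.Int.mod n 3 ≠ 0 then n * (n - 1) * (n - 3)
  else (n - 1) * (n - 2) * (n - 3)

-- ===== PRECONDITION & SPEC =====
def Spec_lcmTriplets (n : Int) (out : Int) : Prop := out = lcmTriplets_alt n
instance (n : Int) (out : Int) : Decidable (Spec_lcmTriplets n out) := by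
  unfold Spec_lcmTriplets; infer_instance

-- ===== CLAIM (what is proved, stated in full; the proofs are below) =====
def Claim_equal_lcmTriplets : Prop := ∀ (n : Int), Dom_lcmTriplets n → Spec_lcmTriplets n (lcmTriplets n)

-- ===== LEMMAS AND PROOFS =====

def L3 (x y z : Nat) : Nat := Nat.lcm (Nat.lcm x y) z

theorem L3_dvd_prod (x y z : Nat) : L3 x y z ∣ x*y*z :=
  Nat.lcm_dvd (Nat.lcm_dvd ((dvd_mul_right x y).mul_right z) ((dvd_mul_left y x).mul_right z))
    (dvd_mul_left z (x*y))

theorem L3_le_prod (x y z : Nat) (hx : 0 < x) (hy : 0 < y) (hz : 0 < z) : L3 x y z ≤ x*y*z :=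
  Nat.le_of_dvd (by positivity) (L3_dvd_prod x y z)

theorem lcm_le_mul (x y : Nat) (hx : 0 < x) (hy : 0 < y) : Nat.lcm x y ≤ x * y :=
  Nat.le_of_dvd (by positivity) (Nat.lcm_dvd (dvd_mul_right x y) (dvd_mul_left y x))

-- d divides two of them
theorem L3_left (d x y z : Nat) (hx : 0 < x) (hy : 0 < y) (hz : 0 < z)
    (h1 : d ∣ x) (h2 : d ∣ y) : d * L3 x y z ≤ x*y*z := by
  have hg : d ∣ Nat.gcd x y := Nat.dvd_gcd h1 h2
  have hlcm : Nat.lcm x y * Nat.gcd x y = x * y := by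
    rw [mul_comm]; exact Nat.gcd_mul_lcm x y
  have h3 : Nat.lcm x y * d ≤ x * y := by
    calc Nat.lcm x y * d ≤ Nat.lcm x y * Nat.gcd x y :=
          Nat.mul_le_mul_left _ (Nat.le_of_dvd (Nat.gcd_pos_of_pos_left _ hx) hg)
      _ = x * y := hlcm
  have h4 : L3 x y z ≤ Nat.lcm x y * z :=
    Nat.le_of_dvd (by positivity) (Nat.lcm_dvd (dvd_mul_right _ z) (dvd_mul_left z _))
  calc d * L3 x y z ≤ d * (Nat.lcm x y * z) := Nat.mul_le_mul_left _ h4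
    _ = (Nat.lcm x y * d) * z := by ring
    _ ≤ (x * y) * z := Nat.mul_le_mul_right _ h3

theorem L3_right (d x y z : Nat) (hx : 0 < x) (hy : 0 < y) (hz : 0 < z)
    (h1 : d ∣ x ∨ d ∣ y) (h2 : d ∣ z) : d * L3 x y z ≤ x*y*z := by
  have ha : d ∣ Nat.lcm x y := by
    rcases h1 with h | h
    · exact h.trans (Nat.dvd_lcm_left x y)
    · exact h.trans (Nat.dvd_lcm_right x y)
  have hg : d ∣ Nat.gcd (Nat.lcm x y) z := Nat.dvd_gcd ha h2
  have hlcm : L3 x y z * Nat.gcd (Nat.lcm x y) z = Nat.lcm x y * z := by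
    rw [L3, mul_comm]; exact Nat.gcd_mul_lcm _ z
  have hlpos : 0 < Nat.lcm x y := Nat.pos_of_ne_zero (fun h => by
    rcases Nat.lcm_eq_zero_iff.mp h with h | h <;> omega)
  have h3 : d * L3 x y z ≤ Nat.lcm x y * z := by
    calc d * L3 x y z = L3 x y z * d := by ring
      _ ≤ L3 x y z * Nat.gcd (Nat.lcm x y) z :=
          Nat.mul_le_mul_left _ (Nat.le_of_dvd (Nat.gcd_pos_of_pos_left _ hlpos) hg)
      _ = Nat.lcm x y * z := hlcm
  calc d * L3 x y z ≤ Nat.lcm x y * z := h3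
    _ ≤ (x * y) * z := Nat.mul_le_mul_right _ (lcm_le_mul x y hx hy)

theorem L3_coprime (x y z : Nat) (hxy : Nat.Coprime x y) (hxz : Nat.Coprime x z)
    (hyz : Nat.Coprime y z) : L3 x y z = x*y*z := by
  rw [L3, Nat.Coprime.lcm_eq_mul hxy, Nat.Coprime.lcm_eq_mul (Nat.Coprime.mul hxz hyz)]

theorem cop_of_gcd_dvd_two (a b : Nat) (hd : Nat.gcd a b ∣ 2) (h : ¬ 2 ∣ a) : Nat.Coprime a b := by
  rcases (Nat.dvd_prime Nat.prime_two).mp hd with h1 | h1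
  · exact h1
  · exact absurd (h1 ▸ Nat.gcd_dvd_left a b) h

theorem cop_of_gcd_dvd_three (a b : Nat) (hd : Nat.gcd a b ∣ 3) (h : ¬ 3 ∣ a) : Nat.Coprime a b := by
  rcases (Nat.dvd_prime Nat.prime_three).mp hd with h1 | h1
  · exact h1
  · exact absurd (h1 ▸ Nat.gcd_dvd_left a b) h

theorem gcd_dvd_sub (a b : Nat) : Nat.gcd a b ∣ a - b :=
  Nat.dvd_sub (Nat.gcd_dvd_left a b) (Nat.gcd_dvd_right a b)

theorem cop_adj (a b : Nat) (h : a - b = 1) : Nat.Coprime a b :=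
  Nat.dvd_one.mp (h ▸ gcd_dvd_sub a b)

theorem lcm_left_comm_nat (a b c : Nat) : Nat.lcm a (Nat.lcm b c) = Nat.lcm b (Nat.lcm a c) := by
  rw [← Nat.lcm_assoc, Nat.lcm_comm a b, Nat.lcm_assoc]

theorem sort3 (lo hi x y z : Nat) (hx : lo ≤ x ∧ x ≤ hi) (hy : lo ≤ y ∧ y ≤ hi)
    (hz : lo ≤ z ∧ z ≤ hi) (hxy : x ≠ y) (hyz : y ≠ z) (hxz : x ≠ z) :
    ∃ a b c, (lo ≤ a ∧ a ≤ hi) ∧ (lo ≤ b ∧ b ≤ hi) ∧ (lo ≤ c ∧ c ≤ hi) ∧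
      a < b ∧ b < c ∧ L3 x y z = L3 a b c := by
  rcases Nat.lt_trichotomy x y with h1 | h1 | h1
  · rcases Nat.lt_trichotomy y z with h2 | h2 | h2
    · exact ⟨x, y, z, hx, hy, hz, h1, h2, rfl⟩
    · omega
    · rcases Nat.lt_trichotomy x z with h3 | h3 | h3
      · exact ⟨x, z, y, hx, hz, hy, h3, by omega, by simp [L3, Nat.lcm_comm, Nat.lcm_assoc, lcm_left_comm_nat]⟩
      · omega
      · exact ⟨z, x, y, hz, hx, hy, h3, h1, by simp [L3, Nat.lcm_comm, Nat.lcm_assoc, lcm_left_comm_nat]⟩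
  · omega
  · rcases Nat.lt_trichotomy x z with h2 | h2 | h2
    · exact ⟨y, x, z, hy, hx, hz, h1, h2, by simp [L3, Nat.lcm_comm, Nat.lcm_assoc, lcm_left_comm_nat]⟩
    · omega
    · rcases Nat.lt_trichotomy y z with h3 | h3 | h3
      · exact ⟨y, z, x, hy, hz, hx, h3, h2, by simp [L3, Nat.lcm_comm, Nat.lcm_assoc, lcm_left_comm_nat]⟩
      · omega
      · exact ⟨z, y, x, hz, hy, hx, h3, h1, by simp [L3, Nat.lcm_comm, Nat.lcm_assoc, lcm_left_comm_nat]⟩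

theorem prod3_mono (x y z A B C : Nat) (h1 : x ≤ A) (h2 : y ≤ B) (h3 : z ≤ C) :
    x*y*z ≤ A*B*C := Nat.mul_le_mul (Nat.mul_le_mul h1 h2) h3

-- sorted triple in [N-5, N], N ≥ 8
theorem upper_odd (N x y z : Nat) (h8 : 8 ≤ N)
    (hx : N-5 ≤ x) (hxy : x < y) (hyz : y < z) (hzN : z ≤ N) :
    L3 x y z ≤ N*(N-1)*(N-2) := by
  have hp := L3_le_prod x y z (by omega) (by omega) (by omega)
  exact le_trans hp ((prod3_mono x y z (N-2) (N-1) N (by omega) (by omega) (by omega)).trans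
    (le_of_eq (by ring)))

theorem two_le_cancel (d L B : Nat) (hd : 0 < d) (h : d * L ≤ d * B) : L ≤ B :=
  Nat.le_of_mul_le_mul_left h hd

theorem upper_even (N x y z : Nat) (h8 : 8 ≤ N) (h2N : 2 ∣ N) (h3N : ¬ 3 ∣ N)
    (hx : N-5 ≤ x) (hxy : x < y) (hyz : y < z) (hzN : z ≤ N) :
    L3 x y z ≤ N*(N-1)*(N-3) := by
  have px : 0 < x := by omega
  have py : 0 < y := by omega
  have pz : 0 < z := by omega
  have hbig : x*y*z ≤ (N-2)*(N-1)*N := prod3_mono x y z (N-2) (N-1) N (by omega) (by omega) (by omega)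
  have h2big : (N-2)*(N-1)*N ≤ 2*(N*(N-1)*(N-3)) := by
    have hN : (8:Int) ≤ (N:Int) := by exact_mod_cast h8
    zify [show 2 ≤ N by omega, show 1 ≤ N by omega, show 3 ≤ N by omega]
    nlinarith [mul_nonneg (mul_nonneg (by linarith : (0:Int) ≤ (N:Int)-4)
      (by linarith : (0:Int) ≤ (N:Int)-1)) (by linarith : (0:Int) ≤ (N:Int))]
  by_cases hex : 2 ∣ x <;> by_cases hey : 2 ∣ y <;> by_cases hez : 2 ∣ z
  -- two-even cases
  · exact two_le_cancel 2 _ _ (by norm_num) ((L3_left 2 x y z px py pz hex hey).trans (hbig.trans h2big))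
  · exact two_le_cancel 2 _ _ (by norm_num) ((L3_left 2 x y z px py pz hex hey).trans (hbig.trans h2big))
  · exact two_le_cancel 2 _ _ (by norm_num) ((L3_right 2 x y z px py pz (Or.inl hex) hez).trans (hbig.trans h2big))
  -- x even, y z odd
  · exact le_trans (L3_le_prod x y z px py pz)
      ((prod3_mono x y z N (N-3) (N-1) (by omega) (by omega) (by omega)).trans (le_of_eq (by ring)))
  · exact two_le_cancel 2 _ _ (by norm_num) ((L3_right 2 x y z px py pz (Or.inr hey) hez).trans (hbig.trans h2big))
  -- y even, x z odd
  · exact le_trans (L3_le_prod x y z px py pz)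
      ((prod3_mono x y z (N-3) N (N-1) (by omega) (by omega) (by omega)).trans (le_of_eq (by ring)))
  -- z even, x y odd
  · exact le_trans (L3_le_prod x y z px py pz)
      ((prod3_mono x y z (N-3) (N-1) N (by omega) (by omega) (by omega)).trans (le_of_eq (by ring)))
  -- all odd
  · exact le_trans (L3_le_prod x y z px py pz)
      ((prod3_mono x y z N (N-3) (N-1) (by omega) (by omega) (by omega)).trans (le_of_eq (by ring)))

theorem upper_even3 (N x y z : Nat) (h8 : 8 ≤ N) (h2N : 2 ∣ N) (h3N : 3 ∣ N)
    (hx : N-5 ≤ x) (hxy : x < y) (hyz : y < z) (hzN : z ≤ N) :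
    L3 x y z ≤ (N-1)*(N-2)*(N-3) := by
  have px : 0 < x := by omega
  have py : 0 < y := by omega
  have pz : 0 < z := by omega
  have hN : (8:Int) ≤ (N:Int) := by exact_mod_cast h8
  by_cases hzN' : z ≤ N - 1
  · exact le_trans (L3_le_prod x y z px py pz)
      ((prod3_mono x y z (N-3) (N-2) (N-1) (by omega) (by omega) (by omega)).trans (le_of_eq (by ring)))
  · have hzN2 : z = N := by omega
    have h2z : 2 ∣ z := by omega
    have h3z : 3 ∣ z := by omega
    have h1 : x*y*z ≤ (N-2)*(N-1)*N := prod3_mono x y z (N-2) (N-1) N (by omega) (by omega) hzN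
    have h2 : (N-2)*(N-1)*N ≤ 2*((N-1)*(N-2)*(N-3)) := by
      zify [show 1 ≤ N by omega, show 2 ≤ N by omega, show 3 ≤ N by omega]
      nlinarith [mul_nonneg (mul_nonneg (by linarith : (0:Int) ≤ (N:Int)-6)
        (by linarith : (0:Int) ≤ (N:Int)-1)) (by linarith : (0:Int) ≤ (N:Int)-2)]
    by_cases hey : 2 ∣ y
    · exact two_le_cancel 2 _ _ (by norm_num)
        ((L3_right 2 x y z px py pz (Or.inr hey) h2z).trans (h1.trans h2))
    · by_cases hex : 2 ∣ x
      · exact two_le_cancel 2 _ _ (by norm_num)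
          ((L3_right 2 x y z px py pz (Or.inl hex) h2z).trans (h1.trans h2))
      · -- x, y odd; z = N
        have h1' : x*y*z ≤ (N-3)*(N-1)*N := prod3_mono x y z (N-3) (N-1) N (by omega) (by omega) hzN
        have h2' : (N-3)*(N-1)*N ≤ 3*((N-1)*(N-2)*(N-3)) := by
          zify [show 1 ≤ N by omega, show 2 ≤ N by omega, show 3 ≤ N by omega]
          nlinarith [mul_nonneg (mul_nonneg (by linarith : (0:Int) ≤ 2*(N:Int)-6)
            (by linarith : (0:Int) ≤ (N:Int)-1)) (by linarith : (0:Int) ≤ (N:Int)-3)]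
        by_cases h3y : 3 ∣ y
        · exact two_le_cancel 3 _ _ (by norm_num)
            ((L3_right 3 x y z px py pz (Or.inr h3y) h3z).trans (h1'.trans h2'))
        · by_cases h3x : 3 ∣ x
          · exact two_le_cancel 3 _ _ (by norm_num)
              ((L3_right 3 x y z px py pz (Or.inl h3x) h3z).trans (h1'.trans h2'))
          · have hxc : x = N-5 ∨ x = N-3 := by omega
            have hyc : y = N-1 ∨ y = N-3 := by omega
            have hxv : x = N - 5 ∧ y = N - 1 := by
              rcases hxc with h' | h' <;> rcases hyc with h'' | h'' <;> omega
            have hb : x*y*z ≤ (N-5)*(N-1)*N :=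
              prod3_mono x y z (N-5) (N-1) N (by omega) (by omega) hzN
            have h1'' : (N-5)*(N-1)*N ≤ (N-1)*(N-2)*(N-3) := by
              zify [show 1 ≤ N by omega, show 2 ≤ N by omega, show 3 ≤ N by omega, show 5 ≤ N by omega]
              nlinarith [mul_nonneg (by linarith : (0:Int) ≤ (N:Int)-1)
                (by linarith : (0:Int) ≤ (N:Int)-6)]
            exact le_trans (L3_le_prod x y z px py pz) (hb.trans h1'')

-- generic accumulator-fold lemmas
theorem foldl_ge {α : Type} (xs : List α) (g : Int → α → Int)
    (hmono : ∀ a x, x ∈ xs → a ≤ g a x) (A : Int) : A ≤ xs.foldl g A := by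
  induction xs generalizing A with
  | nil => exact le_refl A
  | cons y t ih =>
    exact le_trans (hmono A y (by simp)) (ih (fun a x hx => hmono a x (by simp [hx])) (g A y))

theorem foldl_le {α : Type} (xs : List α) (g : Int → α → Int) (B : Int)
    (h : ∀ a x, x ∈ xs → a ≤ B → g a x ≤ B) (A : Int) (hA : A ≤ B) : xs.foldl g A ≤ B := by
  induction xs generalizing A with
  | nil => exact hA
  | cons y t ih =>
    exact ih (fun a x hx => h a x (by simp [hx])) (g A y) (h A y (by simp) hA)

theorem foldl_attain {α : Type} (xs : List α) (g : Int → α → Int)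
    (hmono : ∀ a x, x ∈ xs → a ≤ g a x) (x : α) (hx : x ∈ xs) (v : Int)
    (hv : ∀ a, v ≤ g a x) (A : Int) : v ≤ xs.foldl g A := by
  induction xs generalizing A with
  | nil => cases hx
  | cons y t ih =>
    rcases List.mem_cons.mp hx with rfl | hmem
    · exact le_trans (hv A) (foldl_ge t g (fun a z hz => hmono a z (by simp [hz])) (g A x))
    · exact ih (fun a z hz => hmono a z (by simp [hz])) hmem (g A y)


theorem pyLcm_eq (a b : Int) (ha : 0 < a) (hb : 0 < b) :
    pyLcm a b = ((Nat.lcm a.toNat b.toNat : Nat) : Int) := by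
  have h1 : a = ((a.toNat : Nat) : Int) := by omega
  have h2 : b = ((b.toNat : Nat) : Int) := by omega
  rw [pyLcm, h1, h2]
  rw [show (((a.toNat : Nat) : Int) * ((b.toNat : Nat) : Int)) = ((a.toNat * b.toNat : Nat) : Int) by push_cast; ring]
  rw [show (Int.gcd ((a.toNat : Nat) : Int) ((b.toNat : Nat) : Int) : Int) = ((Nat.gcd a.toNat b.toNat : Nat) : Int) by
    rw [Int.gcd_natCast_natCast]]
  rw [PySem.Int.floordiv_natCast]
  simp only [Int.toNat_natCast, Nat.lcm]

theorem pyLcm3_eq (a b c : Int) (ha : 0 < a) (hb : 0 < b) (hc : 0 < c) :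
    pyLcm3 a b c = ((L3 a.toNat b.toNat c.toNat : Nat) : Int) := by
  have hl : 0 < Nat.lcm a.toNat b.toNat := Nat.pos_of_ne_zero (fun h => by
    rcases Nat.lcm_eq_zero_iff.mp h with h | h <;> omega)
  rw [pyLcm3, pyLcm_eq a b ha hb, pyLcm_eq _ _ (by exact_mod_cast hl) hc, L3]
  simp

theorem att_odd (N : Nat) (h8 : 8 ≤ N) (hodd : ¬ 2 ∣ N) :
    L3 N (N-1) (N-2) = N*(N-1)*(N-2) :=
  L3_coprime N (N-1) (N-2) (cop_adj N (N-1) (by omega))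
    (cop_of_gcd_dvd_two N (N-2) (by have h := gcd_dvd_sub N (N-2); rwa [show N-(N-2)=2 from by omega] at h) hodd)
    (cop_adj (N-1) (N-2) (by omega))

theorem att_even (N : Nat) (h8 : 8 ≤ N) (h2N : 2 ∣ N) (h3N : ¬ 3 ∣ N) :
    L3 N (N-1) (N-3) = N*(N-1)*(N-3) :=
  L3_coprime N (N-1) (N-3) (cop_adj N (N-1) (by omega))
    (cop_of_gcd_dvd_three N (N-3) (by have h := gcd_dvd_sub N (N-3); rwa [show N-(N-3)=3 from by omega] at h) h3N)
    (cop_of_gcd_dvd_two (N-1) (N-3) (by have h := gcd_dvd_sub (N-1) (N-3); rwa [show (N-1)-(N-3)=2 from by omega] at h) (by omega))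

theorem att_even3 (N : Nat) (h8 : 8 ≤ N) (h2N : 2 ∣ N) :
    L3 (N-1) (N-2) (N-3) = (N-1)*(N-2)*(N-3) :=
  L3_coprime (N-1) (N-2) (N-3) (cop_adj (N-1) (N-2) (by omega))
    (cop_of_gcd_dvd_two (N-1) (N-3) (by have h := gcd_dvd_sub (N-1) (N-3); rwa [show (N-1)-(N-3)=2 from by omega] at h) (by omega))
    (cop_adj (N-2) (N-3) (by omega))



theorem fold_eq (n F : Int) (h8 : 8 ≤ n) (hF0 : 0 ≤ F)
    (hub : ∀ i j k : Int, n-5 ≤ i → i ≤ n → n-5 ≤ j → j ≤ n → n-5 ≤ k → k ≤ n →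
            i ≠ j → j ≠ k → i ≠ k → pyLcm3 i j k ≤ F)
    (wi wj wk : Int)
    (hw : n-5 ≤ wi ∧ wi ≤ n ∧ n-5 ≤ wj ∧ wj ≤ n ∧ n-5 ≤ wk ∧ wk ≤ n ∧ wi ≠ wj ∧ wj ≠ wk ∧ wi ≠ wk)
    (hwv : F ≤ pyLcm3 wi wj wk) :
    lcmTriplets n = F := by
  obtain ⟨hwi1, hwi2, hwj1, hwj2, hwk1, hwk2, hd1, hd2, hd3⟩ := hw
  unfold lcmTriplets
  rw [if_neg (by omega)]
  rw [max_eq_left (by omega : (0:Int) ≤ n - 6)]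
  set R := PySem.List.pyRange n (n - 6) (-1) with hR
  have hmem : ∀ i : Int, i ∈ R ↔ n - 6 < i ∧ i ≤ n := fun i => PySem.List.mem_pyRange_neg_one
  -- monotonicity of the three loop bodies
  have m3 : ∀ i j : Int, ∀ a : Int, ∀ k, k ∈ R →
      a ≤ (if i ≠ j ∧ j ≠ k ∧ i ≠ k then max a (pyLcm3 i j k) else a) := by
    intro i j a k _; split
    · exact le_max_left _ _
    · exact le_refl a
  have m2 : ∀ i : Int, ∀ a : Int, ∀ j, j ∈ R →
      a ≤ R.foldl (fun acc3 k => if i ≠ j ∧ j ≠ k ∧ i ≠ k then max acc3 (pyLcm3 i j k) else acc3) a :=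
    fun i a j _ => foldl_ge R _ (m3 i j) a
  have m1 : ∀ a : Int, ∀ i, i ∈ R →
      a ≤ R.foldl (fun acc2 j => R.foldl (fun acc3 k => if i ≠ j ∧ j ≠ k ∧ i ≠ k then max acc3 (pyLcm3 i j k) else acc3) acc2) a :=
    fun a i _ => foldl_ge R _ (m2 i) a
  apply le_antisymm
  · -- upper bound
    apply foldl_le
    · intro a i hi ha
      apply foldl_le
      · intro b j hj hb
        apply foldl_le
        · intro c k hk hc
          split
          · rename_i hg
            refine max_le hc (hub i j k ?_ ?_ ?_ ?_ ?_ ?_ hg.1 hg.2.1 hg.2.2) <;>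
              (first | omega | (have := (hmem i).mp hi; have := (hmem j).mp hj; have := (hmem k).mp hk; omega))
          · exact hc
        · exact hb
      · exact ha
    · exact hF0
  · -- attainment
    apply foldl_attain R _ m1 wi ((hmem wi).mpr (by omega)) F _ 0
    intro a
    apply foldl_attain R _ (m2 wi) wj ((hmem wj).mpr (by omega)) F _ a
    intro b
    apply foldl_attain R _ (m3 wi wj) wk ((hmem wk).mpr (by omega)) F _ b
    intro c
    rw [if_pos ⟨hd1, hd2, hd3⟩]
    exact le_trans hwv (le_max_right _ _)



theorem cast3 (N a b c : Nat) (h : 5 ≤ N) (ha : a ≤ 5) (hb : b ≤ 5) (hc : c ≤ 5) :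
    (((N-a)*(N-b)*(N-c) : Nat) : Int) = ((N:Int)-a)*((N:Int)-b)*((N:Int)-c) := by
  rw [Nat.cast_mul, Nat.cast_mul, Nat.cast_sub (by omega), Nat.cast_sub (by omega),
    Nat.cast_sub (by omega)]

theorem main_big (n : Int) (h8 : 8 ≤ n) : lcmTriplets n = lcmTriplets_alt n := by
  obtain ⟨N, rfl⟩ : ∃ N : Nat, n = (N : Int) := ⟨n.toNat, by omega⟩
  have h8N : 8 ≤ N := by exact_mod_cast h8
  have hm2 := PySem.Int.mod_nonneg (N : Int) (by norm_num : (0:Int) < 2)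
  have hl2 := PySem.Int.mod_lt (N : Int) (by norm_num : (0:Int) < 2)
  have hz2 := PySem.Int.mod_eq_zero_iff_dvd (N : Int) 2
  have hm3 := PySem.Int.mod_nonneg (N : Int) (by norm_num : (0:Int) < 3)
  have hl3 := PySem.Int.mod_lt (N : Int) (by norm_num : (0:Int) < 3)
  have hz3 := PySem.Int.mod_eq_zero_iff_dvd (N : Int) 3
  -- generic upper-bound transfer
  have tame : ∀ (G : Nat) (hGle : ∀ x y z : Nat, N-5 ≤ x → x < y → y < z → z ≤ N → L3 x y z ≤ G),
      ∀ i j k : Int, (N:Int)-5 ≤ i → i ≤ N → (N:Int)-5 ≤ j → j ≤ N → (N:Int)-5 ≤ k → k ≤ N →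
        i ≠ j → j ≠ k → i ≠ k → pyLcm3 i j k ≤ (G : Int) := by
    intro G hGle i j k hi1 hi2 hj1 hj2 hk1 hk2 hij hjk hik
    rw [pyLcm3_eq i j k (by omega) (by omega) (by omega)]
    obtain ⟨a, b, c, hha, hhb, hhc, hab, hbc, heq⟩ :=
      sort3 (N-5) N i.toNat j.toNat k.toNat (by omega) (by omega) (by omega)
        (by omega) (by omega) (by omega)
    rw [heq]
    exact_mod_cast hGle a b c hha.1 hab hbc hhc.2
  by_cases h2 : 2 ∣ N
  · by_cases h3 : 3 ∣ N
    · -- even, divisible by 3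
      have halt : lcmTriplets_alt (N:Int) = ((N:Int)-1)*((N:Int)-2)*((N:Int)-3) := by
        unfold lcmTriplets_alt
        rw [if_neg (by omega), if_neg (by omega), if_neg (by omega)]
      rw [halt, show ((N:Int)-1)*((N:Int)-2)*((N:Int)-3) = (((N-1)*(N-2)*(N-3) : Nat) : Int) from
        (cast3 N 1 2 3 (by omega) (by omega) (by omega) (by omega)).symm]
      refine fold_eq _ _ h8 (by positivity)
        (tame _ (fun x y z hx hxy hyz hz => upper_even3 N x y z h8N h2 h3 hx hxy hyz hz))
        ((N:Int)-1) ((N:Int)-2) ((N:Int)-3)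
        (by refine ⟨?_, ?_, ?_, ?_, ?_, ?_, ?_, ?_, ?_⟩ <;> omega) ?_
      · rw [pyLcm3_eq _ _ _ (by omega) (by omega) (by omega)]
        have e1 : ((N:Int)-1).toNat = N-1 := by omega
        have e2 : ((N:Int)-2).toNat = N-2 := by omega
        have e3 : ((N:Int)-3).toNat = N-3 := by omega
        rw [e1, e2, e3, att_even3 N h8N h2]
    · -- even, not divisible by 3
      have halt : lcmTriplets_alt (N:Int) = (N:Int)*((N:Int)-1)*((N:Int)-3) := by
        unfold lcmTriplets_alt
        rw [if_neg (by omega), if_neg (by omega), if_pos (by omega)]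
      rw [halt, show (N:Int)*((N:Int)-1)*((N:Int)-3) = (((N-0)*(N-1)*(N-3) : Nat) : Int) from by
        rw [cast3 N 0 1 3 (by omega) (by omega) (by omega) (by omega)]; push_cast; ring]
      refine fold_eq _ _ h8 (by positivity)
        (tame _ (fun x y z hx hxy hyz hz => by
          have := upper_even N x y z h8N h2 h3 hx hxy hyz hz
          simpa [Nat.sub_zero] using this))
        ((N:Int)) ((N:Int)-1) ((N:Int)-3)
        (by refine ⟨?_, ?_, ?_, ?_, ?_, ?_, ?_, ?_, ?_⟩ <;> omega) ?_
      · rw [pyLcm3_eq _ _ _ (by omega) (by omega) (by omega)]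
        have e1 : ((N:Int)).toNat = N := by omega
        have e2 : ((N:Int)-1).toNat = N-1 := by omega
        have e3 : ((N:Int)-3).toNat = N-3 := by omega
        rw [e1, e2, e3, att_even N h8N h2 h3]
        simp [Nat.sub_zero]
  · -- odd
    have halt : lcmTriplets_alt (N:Int) = (N:Int)*((N:Int)-1)*((N:Int)-2) := by
      unfold lcmTriplets_alt
      rw [if_neg (by omega), if_pos (by omega)]
    rw [halt, show (N:Int)*((N:Int)-1)*((N:Int)-2) = (((N-0)*(N-1)*(N-2) : Nat) : Int) from by
      rw [cast3 N 0 1 2 (by omega) (by omega) (by omega) (by omega)]; push_cast; ring]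
    refine fold_eq _ _ h8 (by positivity)
      (tame _ (fun x y z hx hxy hyz hz => by
        have := upper_odd N x y z h8N hx hxy hyz hz
        simpa [Nat.sub_zero] using this))
      ((N:Int)) ((N:Int)-1) ((N:Int)-2)
      (by refine ⟨?_, ?_, ?_, ?_, ?_, ?_, ?_, ?_, ?_⟩ <;> omega) ?_
    · rw [pyLcm3_eq _ _ _ (by omega) (by omega) (by omega)]
      have e1 : ((N:Int)).toNat = N := by omega
      have e2 : ((N:Int)-1).toNat = N-1 := by omega
      have e3 : ((N:Int)-2).toNat = N-2 := by omega
      rw [e1, e2, e3, att_odd N h8N h2]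
      simp [Nat.sub_zero]


set_option maxRecDepth 40000 in
theorem lcmTriplets_A_eq_B (n : Int) : lcmTriplets n = lcmTriplets_alt n := by
  by_cases h2 : n ≤ 2
  · unfold lcmTriplets lcmTriplets_alt
    rw [if_pos h2, if_pos h2]
  · by_cases h8 : 8 ≤ n
    · exact main_big n h8
    · interval_cases n <;> decide

-- ===== VERDICT (by name: the statement is the Claim_ definition above) =====
theorem lcmTriplets_spec : Claim_equal_lcmTriplets := by
  intro n _
  unfold Spec_lcmTriplets
  exact lcmTriplets_A_eq_B n
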